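-- pv_equiv track=rewrite | github.com/YXW555/NutriMind | ai-service/inference/python/app/inference.py | _build_backend_chain
-- ===== SOURCE A (Python) =====
-- def _build_backend_chain(preferred_backend: str) -> list[str]:
--     chain_by_backend = {
--         "llava_next_retrieval": [
--             "llava_next_retrieval",
--             "hybrid_retrieval",
--             "clip_retrieval",
--             "onnx_retrieval",
--             "manifest_retrieval",
--         ],
--         "hybrid_retrieval": [
--             "hybrid_retrieval",
--             "clip_retrieval",
--             "onnx_retrieval",
--             "manifest_retrieval",
--         ],
--         "clip_retrieval": [
--             "clip_retrieval",
--             "onnx_retrieval",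
--             "manifest_retrieval",
--         ],
--         "onnx_retrieval": [
--             "onnx_retrieval",
--             "manifest_retrieval",
--         ],
--         "manifest_retrieval": [
--             "manifest_retrieval",
--         ],
--     }
--
--     ordered = chain_by_backend.get(preferred_backend, ["manifest_retrieval"])
--     deduplicated: list[str] = []
--     for backend in ordered:
--         if backend not in deduplicated:
--             deduplicated.append(backend)
--     return deduplicated
-- ===== SOURCE B (Python) =====
-- _MASTER = [
--     "llava_next_retrieval",
--     "hybrid_retrieval",
--     "clip_retrieval",
--     "onnx_retrieval",
--     "manifest_retrieval",
-- ]
--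
--
-- def _build_backend_chain(preferred_backend: str) -> list[str]:
--     try:
--         pos = _MASTER.index(preferred_backend)
--     except ValueError:
--         return ["manifest_retrieval"]
--     return _MASTER[pos:]
-- ===== Notes on version B (the rewrite author's own statement) =====
-- stated objective: simpler
-- what changed: Replaces the per-backend dict of enumerated chains plus a dedup loop with one master priority list: look up the preferred backend's position and return the suffix from there (default chain if absent).
import Mathlib
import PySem

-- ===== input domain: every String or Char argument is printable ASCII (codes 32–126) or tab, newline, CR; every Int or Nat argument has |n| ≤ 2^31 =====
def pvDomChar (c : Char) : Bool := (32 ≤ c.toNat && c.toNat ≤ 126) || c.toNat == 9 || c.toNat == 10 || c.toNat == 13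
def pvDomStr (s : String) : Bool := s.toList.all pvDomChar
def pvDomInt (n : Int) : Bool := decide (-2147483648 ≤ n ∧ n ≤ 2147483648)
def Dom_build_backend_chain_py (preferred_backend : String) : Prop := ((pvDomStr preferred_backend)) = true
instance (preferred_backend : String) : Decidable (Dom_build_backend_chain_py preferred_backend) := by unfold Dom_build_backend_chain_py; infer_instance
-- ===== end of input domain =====

-- B replaces A's dict of enumerated per-backend chains plus a dedup loop by one master
-- priority list: find the preferred backend's index and return the suffix (objective: simpler).

-- ===== PORT A =====
def build_backend_chain_py (preferred_backend : String) : List String :=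
  let chain_by_backend : PySem.Dict String (List String) := PySem.Dict.ofList
    [ ("llava_next_retrieval",
        ["llava_next_retrieval", "hybrid_retrieval", "clip_retrieval", "onnx_retrieval", "manifest_retrieval"]),
      ("hybrid_retrieval",
        ["hybrid_retrieval", "clip_retrieval", "onnx_retrieval", "manifest_retrieval"]),
      ("clip_retrieval",
        ["clip_retrieval", "onnx_retrieval", "manifest_retrieval"]),
      ("onnx_retrieval",
        ["onnx_retrieval", "manifest_retrieval"]),
      ("manifest_retrieval",
        ["manifest_retrieval"]) ]
  let ordered := chain_by_backend.getD preferred_backend ["manifest_retrieval"]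
  ordered.foldl (fun deduplicated backend =>
    if backend ∈ deduplicated then deduplicated else deduplicated ++ [backend]) []

-- ===== PORT B =====
def pvMaster : List String :=
  ["llava_next_retrieval", "hybrid_retrieval", "clip_retrieval", "onnx_retrieval", "manifest_retrieval"]

def build_backend_chain_py_alt (preferred_backend : String) : List String :=
  match PySem.List.index? pvMaster preferred_backend with
  | none => ["manifest_retrieval"]
  | some pos => PySem.List.slice pvMaster (some (pos : Int)) none

-- ===== PRECONDITION & SPEC =====
def Spec_build_backend_chain_py (preferred_backend : String) (out : List String) : Prop := out = build_backend_chain_py_alt preferred_backend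
instance (preferred_backend : String) (out : List String) : Decidable (Spec_build_backend_chain_py preferred_backend out) := by unfold Spec_build_backend_chain_py; infer_instance

-- ===== CLAIM (what is proved, stated in full; the proofs are below) =====
def Claim_equal_build_backend_chain_py : Prop := ∀ (preferred_backend : String), Dom_build_backend_chain_py preferred_backend → Spec_build_backend_chain_py preferred_backend (build_backend_chain_py preferred_backend)

-- ===== LEMMAS AND PROOFS =====

-- On any string that is not one of the five backend names, both ports return the default chain.
theorem pv_default (p : String)
    (h1 : p ≠ "llava_next_retrieval") (h2 : p ≠ "hybrid_retrieval")
    (h3 : p ≠ "clip_retrieval") (h4 : p ≠ "onnx_retrieval")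
    (h5 : p ≠ "manifest_retrieval") :
    build_backend_chain_py p = build_backend_chain_py_alt p := by
  have b1 : (("llava_next_retrieval" : String) == p) = false := beq_eq_false_iff_ne.mpr (Ne.symm h1)
  have b2 : (("hybrid_retrieval" : String) == p) = false := beq_eq_false_iff_ne.mpr (Ne.symm h2)
  have b3 : (("clip_retrieval" : String) == p) = false := beq_eq_false_iff_ne.mpr (Ne.symm h3)
  have b4 : (("onnx_retrieval" : String) == p) = false := beq_eq_false_iff_ne.mpr (Ne.symm h4)
  have b5 : (("manifest_retrieval" : String) == p) = false := beq_eq_false_iff_ne.mpr (Ne.symm h5)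
  have hdict : (PySem.Dict.ofList
      [ ("llava_next_retrieval",
          ["llava_next_retrieval", "hybrid_retrieval", "clip_retrieval", "onnx_retrieval", "manifest_retrieval"]),
        ("hybrid_retrieval",
          ["hybrid_retrieval", "clip_retrieval", "onnx_retrieval", "manifest_retrieval"]),
        ("clip_retrieval",
          ["clip_retrieval", "onnx_retrieval", "manifest_retrieval"]),
        ("onnx_retrieval",
          ["onnx_retrieval", "manifest_retrieval"]),
        ("manifest_retrieval",
          ["manifest_retrieval"]) ] : PySem.Dict String (List String)) = PySem.Dict.mk
      [ ("llava_next_retrieval",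
          ["llava_next_retrieval", "hybrid_retrieval", "clip_retrieval", "onnx_retrieval", "manifest_retrieval"]),
        ("hybrid_retrieval",
          ["hybrid_retrieval", "clip_retrieval", "onnx_retrieval", "manifest_retrieval"]),
        ("clip_retrieval",
          ["clip_retrieval", "onnx_retrieval", "manifest_retrieval"]),
        ("onnx_retrieval",
          ["onnx_retrieval", "manifest_retrieval"]),
        ("manifest_retrieval",
          ["manifest_retrieval"]) ] := by decide
  simp [build_backend_chain_py, build_backend_chain_py_alt, pvMaster, hdict,
    PySem.Dict.getD, PySem.Dict.get?, PySem.List.index?, List.idxOf?,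
    List.findIdx?_cons, b1, b2, b3, b4, b5]

-- ===== VERDICT (by name: the statement is the Claim_ definition above) =====
theorem build_backend_chain_py_spec : Claim_equal_build_backend_chain_py := by
  intro p _
  show build_backend_chain_py p = build_backend_chain_py_alt p
  by_cases h1 : p = "llava_next_retrieval"; · subst h1; decide
  by_cases h2 : p = "hybrid_retrieval"; · subst h2; decide
  by_cases h3 : p = "clip_retrieval"; · subst h3; decide
  by_cases h4 : p = "onnx_retrieval"; · subst h4; decide
  by_cases h5 : p = "manifest_retrieval"; · subst h5; decide
  exact pv_default p h1 h2 h3 h4 h5
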